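-- pv_equiv track=rewrite | github.com/Molorov/ParagraphTextOCR | basic/utils.py | replace_bo
-- ===== SOURCE A (Python) =====
-- def replace_bo(text, map_dict):
--     if type(text) is dict:
--         """部件级文本, 只替换基字"""
--         new_text = {comp_id: [] for comp_id in text.keys()}
--         for i in range(len(text['HPC'])):
--             if text['HPC'][i] in map_dict.keys():
--                 if map_dict[text['HPC'][i]] == '':
--                     """替换部件为''时，直接删除该字丁"""
--                     continue
--                 new_text['HPC'].append(map_dict[text['HPC'][i]])
--                 for comp_id in new_text.keys():
--                     if comp_id != 'HPC':
--                         assert text[comp_id][i] == ''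
--                         new_text[comp_id].append(text[comp_id][i])
--             else:
--                 for comp_id in new_text.keys():
--                     new_text[comp_id].append(text[comp_id][i])
--     elif type(text) is list:
--         return NotImplementedError
--     else:
--         return TypeError
--     return new_text
-- ===== SOURCE B (Python) =====
-- def replace_bo(text, map_dict):
--     if type(text) is dict:
--         # Pass 1: plan the surviving glyphs from the base-character row alone.
--         plan = []  # (source index, new HPC value, was_replaced)
--         for i, c in enumerate(text['HPC']):
--             if c in map_dict:
--                 v = map_dict[c]
--                 if v == '':
--                     continue  # component replaced by '': drop this glyph
--                 plan.append((i, v, True))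
--             else:
--                 plan.append((i, c, False))
--         # Pass 2: build the result column by column from the plan.
--         new_text = {}
--         for comp_id, col in text.items():
--             if comp_id == 'HPC':
--                 new_text[comp_id] = [v for _, v, _ in plan]
--             else:
--                 out = []
--                 for i, _, replaced in plan:
--                     if replaced:
--                         assert col[i] == ''
--                     out.append(col[i])
--                 new_text[comp_id] = out
--     elif type(text) is list:
--         return NotImplementedError
--     else:
--         return TypeError
--     return new_text
-- ===== Notes on version B (the rewrite author's own statement) =====
-- stated objective: alternative
-- what changed: A interleaves everything in one row loop that mutates a dict of lists (appending to every column at each surviving index); B first scans the HPC row once into an explicit plan of (index, new value, was_replaced) entries and then builds the result dict column by column from that plan.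
import Mathlib
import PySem

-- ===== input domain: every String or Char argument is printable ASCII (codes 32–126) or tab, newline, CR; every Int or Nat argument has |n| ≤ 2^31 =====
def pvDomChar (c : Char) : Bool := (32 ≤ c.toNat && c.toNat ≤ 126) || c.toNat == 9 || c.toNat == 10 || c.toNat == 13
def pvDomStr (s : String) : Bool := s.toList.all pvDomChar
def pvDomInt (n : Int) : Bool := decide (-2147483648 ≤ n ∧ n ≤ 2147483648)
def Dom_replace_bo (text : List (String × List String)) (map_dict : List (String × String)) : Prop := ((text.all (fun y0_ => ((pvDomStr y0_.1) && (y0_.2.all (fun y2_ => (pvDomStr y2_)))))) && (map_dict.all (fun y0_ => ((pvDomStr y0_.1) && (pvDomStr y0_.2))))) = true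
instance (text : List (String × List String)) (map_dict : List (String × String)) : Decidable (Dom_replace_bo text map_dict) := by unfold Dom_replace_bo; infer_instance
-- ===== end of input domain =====

-- B replaces A's row-wise dict mutation by a two-pass plan (scan the HPC row once, then build each
-- column from the plan); equivalence of the returned dict is proved on Pre_ (the non-raising inputs).

-- ===== PORT A =====
-- literal transliteration of A's dict branch (text is a dict here by the type convention);
-- indexing text[comp_id][i] is ported with getD — Pre_ excludes the out-of-range (IndexError),
-- missing-'HPC' (KeyError) and failing-assert inputs, on which Python A raises.
def replace_bo (text : List (String × List String)) (map_dict : List (String × String)) : List (String × List String) :=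
  let t := PySem.Dict.ofList text
  let md := PySem.Dict.ofList map_dict
  let new0 : PySem.Dict String (List String) :=
    t.keys.foldl (fun d k => d.insert k ([] : List String)) PySem.Dict.empty
  let hpc := t.getD "HPC" []
  let fin := (List.range hpc.length).foldl (fun nt i =>
    match md.get? (hpc.getD i "") with
    | some v =>
      if v = "" then nt
      else
        let nt1 := nt.modify "HPC" [] (fun l => l ++ [v])
        nt1.keys.foldl (fun d k =>
          if k ≠ "HPC" then d.modify k [] (fun l => l ++ [(t.getD k []).getD i ""]) else d) nt1
    | none =>
      nt.keys.foldl (fun d k => d.modify k [] (fun l => l ++ [(t.getD k []).getD i ""])) nt) new0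
  fin.items

-- ===== PORT B =====
def replace_bo_alt (text : List (String × List String)) (map_dict : List (String × String)) : List (String × List String) :=
  let t := PySem.Dict.ofList text
  let md := PySem.Dict.ofList map_dict
  -- pass 1: the plan, one entry (index, new HPC value, was_replaced) per surviving glyph
  let plan := (PySem.List.enumerate (t.getD "HPC" [])).foldl (fun p e =>
      match md.get? e.2 with
      | some v => if v = "" then p else p ++ [(e.1, v, true)]
      | none => p ++ [(e.1, e.2, false)]) ([] : List (Int × String × Bool))
  -- pass 2: build the result column by column
  let fin := t.items.foldl (fun (d : PySem.Dict String (List String)) kv =>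
      if kv.1 = "HPC" then d.insert kv.1 (plan.map (fun e => e.2.1))
      else d.insert kv.1 (plan.foldl (fun out e => out ++ [PySem.List.pyGetD kv.2 e.1 ""]) []))
    PySem.Dict.empty
  fin.items

-- ===== PRECONDITION & SPEC =====
-- Pre_ = exactly the inputs on which Python A returns: the dict has an 'HPC' key (else KeyError),
-- and for every surviving row index every other column is long enough (else IndexError) and, when
-- the base character is replaced, holds '' there (else AssertionError).
def Pre_replace_bo (text : List (String × List String)) (map_dict : List (String × String)) : Prop :=
  let t := PySem.Dict.ofList text
  let md := PySem.Dict.ofList map_dict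
  let hpc := t.getD "HPC" []
  t.contains "HPC" = true ∧
  ∀ i < hpc.length, ∀ kv ∈ t.items, kv.1 ≠ "HPC" →
    (let o := md.get? (hpc.getD i "")
     if o = none then i < kv.2.length
     else (o.getD "" ≠ "" → i < kv.2.length ∧ kv.2.getD i "" = ""))
instance (text : List (String × List String)) (map_dict : List (String × String)) : Decidable (Pre_replace_bo text map_dict) := by unfold Pre_replace_bo; infer_instance

def pvWitness_replace_bo : (List (String × List String)) × (List (String × String)) :=
  ([("HPC", ["a", "b"]), ("x", ["", "q"])], [("a", "A")])

def Spec_replace_bo (text : List (String × List String)) (map_dict : List (String × String)) (out : List (String × List String)) : Prop := out = replace_bo_alt text map_dict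
instance (text : List (String × List String)) (map_dict : List (String × String)) (out : List (String × List String)) : Decidable (Spec_replace_bo text map_dict out) := by unfold Spec_replace_bo; infer_instance

-- ===== CLAIM (what is proved, stated in full; the proofs are below) =====
def Claim_equal_replace_bo : Prop := ∀ (text : List (String × List String)) (map_dict : List (String × String)), Dom_replace_bo text map_dict → Pre_replace_bo text map_dict → Spec_replace_bo text map_dict (replace_bo text map_dict)

-- ===== LEMMAS AND PROOFS =====

-- a dict whose items are tabulated over the association list L
def pvTab (L : List (String × List String)) (g : String × List String → List String) : PySem.Dict String (List String) :=
  ⟨L.map (fun kv => (kv.1, g kv))⟩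

-- one plan entry / the whole plan of B, as recursive functions (proof-side mirror of pass 1)
def pvEntry (md : PySem.Dict String String) (s : Int) (c : String) : List (Int × String × Bool) :=
  match md.get? c with
  | some v => if v = "" then [] else [(s, v, true)]
  | none => [(s, c, false)]

def pvPlanOf (md : PySem.Dict String String) : List String → Int → List (Int × String × Bool)
  | [], _ => []
  | c :: tl, s => pvEntry md s c ++ pvPlanOf md tl (s + 1)

-- the column a plan produces for one (key, column) pair
def pvCol (plan : List (Int × String × Bool)) (kv : String × List String) : List String :=
  plan.map (fun e => if kv.1 = "HPC" then e.2.1 else PySem.List.pyGetD kv.2 e.1 "")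

lemma pv_keys_tab (L : List (String × List String)) (g : String × List String → List String) :
    (pvTab L g).keys = L.map Prod.fst := by
  simp [pvTab, PySem.Dict.keys]

lemma pv_key_unique (L : List (String × List String)) (hnd : (L.map Prod.fst).Nodup)
    {kv kv0 : String × List String} (hm : kv ∈ L) (hm0 : kv0 ∈ L) (h : kv.1 = kv0.1) : kv = kv0 := by
  induction L with
  | nil => cases hm
  | cons a tl ih =>
    simp only [List.map_cons, List.nodup_cons] at hnd
    rcases List.mem_cons.1 hm with rfl | hm' <;> rcases List.mem_cons.1 hm0 with rfl | hm0'
    · rfl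
    · exact absurd (h ▸ List.mem_map_of_mem hm0') hnd.1
    · exact absurd (h ▸ List.mem_map_of_mem hm') hnd.1
    · exact ih hnd.2 hm' hm0'


lemma pv_find_tab (L : List (String × List String)) (g : String × List String → List String)
    (hnd : (L.map Prod.fst).Nodup) {kv0 : String × List String} (hm : kv0 ∈ L) :
    List.find? (fun p => p.1 == kv0.1) (L.map (fun kv => (kv.1, g kv))) = some (kv0.1, g kv0) := by
  induction L with
  | nil => cases hm
  | cons a tl ih =>
    simp only [List.map_cons, List.nodup_cons] at hnd
    rcases List.mem_cons.1 hm with rfl | hm'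
    · simp
    · have hne : a.1 ≠ kv0.1 := by
        intro h; exact hnd.1 (h ▸ List.mem_map_of_mem hm')
      simp [hne, ih hnd.2 hm']


lemma pv_get?_tab (L : List (String × List String)) (g : String × List String → List String)
    (hnd : (L.map Prod.fst).Nodup) {kv0 : String × List String} (hm : kv0 ∈ L) :
    (pvTab L g).get? kv0.1 = some (g kv0) := by
  simp [PySem.Dict.get?, pvTab, pv_find_tab L g hnd hm]


lemma pv_contains_tab (L : List (String × List String)) (g : String × List String → List String)
    {kv0 : String × List String} (hm : kv0 ∈ L) : (pvTab L g).contains kv0.1 = true := by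
  simp only [PySem.Dict.contains, pvTab, List.any_eq_true]
  exact ⟨(kv0.1, g kv0), List.mem_map_of_mem hm, by simp⟩


lemma pv_tab_congr (L : List (String × List String)) (g g' : String × List String → List String)
    (h : ∀ kv ∈ L, g kv = g' kv) : pvTab L g = pvTab L g' := by
  simp only [pvTab, PySem.Dict.mk.injEq]
  exact List.map_congr_left (fun kv hkv => by rw [h kv hkv])


lemma pv_modify_tab (L : List (String × List String)) (g : String × List String → List String)
    (hnd : (L.map Prod.fst).Nodup) {kv0 : String × List String} (hm : kv0 ∈ L)
    (f : List String → List String) :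
    (pvTab L g).modify kv0.1 [] f = pvTab L (fun kv => if kv.1 = kv0.1 then f (g kv0) else g kv) := by
  have hg : (pvTab L g).getD kv0.1 [] = g kv0 := by
    simp [PySem.Dict.getD, pv_get?_tab L g hnd hm]
  rw [PySem.Dict.modify, hg, PySem.Dict.insert, if_pos (pv_contains_tab L g hm)]
  simp only [pvTab, PySem.Dict.mk.injEq, List.map_map]
  refine List.map_congr_left (fun kv hkv => ?_)
  by_cases h : kv.1 = kv0.1
  · simp [Function.comp, h]
  · simp [Function.comp, h]

lemma pv_fold_modify (L : List (String × List String)) (g : String × List String → List String)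
    (hnd : (L.map Prod.fst).Nodup) (ks : List String)
    (hks : ∀ k ∈ ks, ∃ kv ∈ L, kv.1 = k) (hknd : ks.Nodup)
    (P : String → Prop) [DecidablePred P] (val : String → String) :
    ks.foldl (fun d k => if P k then d.modify k [] (fun l => l ++ [val k]) else d) (pvTab L g)
      = pvTab L (fun kv => if kv.1 ∈ ks ∧ P kv.1 then g kv ++ [val kv.1] else g kv) := by
  induction ks generalizing g with
  | nil => simp
  | cons k ks' ih =>
    simp only [List.nodup_cons] at hknd
    have hks' : ∀ k' ∈ ks', ∃ kv ∈ L, kv.1 = k' := fun k' h => hks k' (List.mem_cons_of_mem _ h)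
    rw [List.foldl_cons]
    by_cases hP : P k
    · obtain ⟨kv0, hkv0, rfl⟩ := hks k (List.mem_cons_self ..)
      rw [if_pos hP, pv_modify_tab L g hnd hkv0]
      rw [ih _ hks' hknd.2]
      refine pv_tab_congr L _ _ (fun kv hkv => ?_)
      by_cases hk : kv.1 = kv0.1
      · have : kv = kv0 := pv_key_unique L hnd hkv hkv0 hk
        subst this
        simp [hknd.1, hP]
      · have h1 : (kv.1 ∈ ks' ↔ kv.1 ∈ kv0.1 :: ks') := by
          simp [List.mem_cons, hk]
        simp only [if_neg hk]
        by_cases h2 : kv.1 ∈ ks' ∧ P kv.1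
        · rw [if_pos h2, if_pos ⟨h1.1 h2.1, h2.2⟩]
        · rw [if_neg h2, if_neg (fun hc => h2 ⟨h1.2 hc.1, hc.2⟩)]
    · rw [if_neg hP, ih _ hks' hknd.2]
      refine pv_tab_congr L _ _ (fun kv hkv => ?_)
      by_cases hk : kv.1 = k
      · simp [hk, hP]
      · simp [List.mem_cons, hk]


lemma pv_fold_insert {ι : Type} (key : ι → String) (F : ι → List String) (l : List ι)
    (d : PySem.Dict String (List String)) (hdis : ∀ x ∈ l, d.contains (key x) = false)
    (hnd : (l.map key).Nodup) :
    l.foldl (fun d x => d.insert (key x) (F x)) d = ⟨d.items ++ l.map (fun x => (key x, F x))⟩ := by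
  induction l generalizing d with
  | nil => simp
  | cons x tl ih =>
    simp only [List.map_cons, List.nodup_cons] at hnd
    rw [List.foldl_cons, PySem.Dict.insert, if_neg (by simp [hdis x (List.mem_cons_self ..)])]
    rw [ih ⟨d.items ++ [(key x, F x)]⟩ ?_ hnd.2]
    · simp
    · intro y hy
      have h1 : d.contains (key y) = false := hdis y (List.mem_cons_of_mem _ hy)
      have h2 : key x ≠ key y := fun h => hnd.1 (h ▸ List.mem_map_of_mem hy)
      simp only [PySem.Dict.contains] at h1 ⊢
      simp [h1, h2]


lemma pv_planB (md : PySem.Dict String String) (xs : List String) (s : Int)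
    (acc : List (Int × String × Bool)) :
    (PySem.List.enumerate xs s).foldl (fun p e =>
      match md.get? e.2 with
      | some v => if v = "" then p else p ++ [(e.1, v, true)]
      | none => p ++ [(e.1, e.2, false)]) acc = acc ++ pvPlanOf md xs s := by
  induction xs generalizing s acc with
  | nil => simp [PySem.List.enumerate, pvPlanOf]
  | cons c tl ih =>
    have he : PySem.List.enumerate (c :: tl) s = (s, c) :: PySem.List.enumerate tl (s + 1) := rfl
    rw [he, List.foldl_cons]
    simp only [pvPlanOf, pvEntry]
    cases h : md.get? c with
    | none => simp [ih]
    | some v =>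
      by_cases hv : v = "" <;> simp [hv, ih]


lemma pv_planOf_append (md : PySem.Dict String String) (xs ys : List String) (s : Int) :
    pvPlanOf md (xs ++ ys) s = pvPlanOf md xs s ++ pvPlanOf md ys (s + xs.length) := by
  induction xs generalizing s with
  | nil => simp [pvPlanOf]
  | cons c tl ih =>
    simp only [List.cons_append, pvPlanOf, ih, List.append_assoc, List.length_cons]
    congr 2
    push_cast
    ring_nf


lemma pv_col_append (p q : List (Int × String × Bool)) (kv : String × List String) :
    pvCol (p ++ q) kv = pvCol p kv ++ pvCol q kv := by
  simp [pvCol]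


lemma pv_get?_items (t : PySem.Dict String (List String))
    (hnd : (t.items.map Prod.fst).Nodup) {kv : String × List String} (hm : kv ∈ t.items) :
    t.get? kv.1 = some kv.2 := by
  have h := pv_find_tab t.items (fun kv => kv.2) hnd hm
  rw [show (List.map (fun kv : String × List String => (kv.1, kv.2)) t.items) = t.items by simp] at h
  simp [PySem.Dict.get?, h]

lemma pv_getD_items (t : PySem.Dict String (List String))
    (hnd : (t.items.map Prod.fst).Nodup) {kv : String × List String} (hm : kv ∈ t.items) :
    t.getD kv.1 [] = kv.2 := by
  simp [PySem.Dict.getD, pv_get?_items t hnd hm]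

lemma pv_A_inv (md : PySem.Dict String String) (t : PySem.Dict String (List String))
    (hnd : (t.items.map Prod.fst).Nodup) {kvH : String × List String}
    (hkvH : kvH ∈ t.items) (hH : kvH.1 = "HPC") (n : Nat) (hn : n ≤ kvH.2.length) :
    (List.range n).foldl (fun nt i =>
      match md.get? (kvH.2.getD i "") with
      | some v =>
        if v = "" then nt
        else
          let nt1 := nt.modify "HPC" [] (fun l => l ++ [v])
          nt1.keys.foldl (fun d k =>
            if k ≠ "HPC" then d.modify k [] (fun l => l ++ [(t.getD k []).getD i ""]) else d) nt1
      | none =>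
        nt.keys.foldl (fun d k => d.modify k [] (fun l => l ++ [(t.getD k []).getD i ""])) nt)
      (pvTab t.items (fun _ => []))
    = pvTab t.items (pvCol (pvPlanOf md (kvH.2.take n) 0)) := by
  induction n with
  | zero =>
    refine (pv_tab_congr _ _ _ (fun kv _ => ?_)).symm
    simp [pvPlanOf, pvCol]
  | succ n ih =>
    have hlt : n < kvH.2.length := hn
    rw [List.range_succ, List.foldl_append, ih (le_of_lt hlt), List.foldl_cons, List.foldl_nil]
    have htake : kvH.2.take (n+1) = kvH.2.take n ++ [kvH.2[n]] := by
      rw [List.take_add_one, List.getElem?_eq_getElem hlt]; rfl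
    have hlen : (kvH.2.take n).length = n := by simp [List.length_take, le_of_lt hlt]
    rw [htake, pv_planOf_append, hlen]
    rw [List.getD_eq_getElem kvH.2 "" hlt]
    have hmem : ∀ kv : String × List String, kv ∈ t.items → kv.1 ∈ t.items.map Prod.fst :=
      fun kv h => List.mem_map_of_mem h
    have hks : ∀ k ∈ t.items.map Prod.fst, ∃ kv ∈ t.items, kv.1 = k := by
      intro k hk; obtain ⟨kv, h1, h2⟩ := List.mem_map.1 hk; exact ⟨kv, h1, h2⟩
    cases hmd : md.get? kvH.2[n] with
    | none =>
      simp only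
      have hbody : (fun (d : PySem.Dict String (List String)) k =>
            d.modify k [] (fun l => l ++ [(t.getD k []).getD n ""]))
          = (fun d k => if (fun _ : String => True) k then d.modify k [] (fun l => l ++ [(t.getD k []).getD n ""]) else d) := by
        funext d k; rw [if_pos trivial]
      rw [pv_keys_tab, hbody, pv_fold_modify t.items _ hnd _ hks hnd (fun _ => True) _]
      refine pv_tab_congr _ _ _ (fun kv hkv => ?_)
      rw [pv_col_append, if_pos ⟨hmem kv hkv, trivial⟩]
      congr 1
      rw [pv_getD_items t hnd hkv]
      simp only [pvEntry, hmd, pvPlanOf, pvCol, List.map, List.append_nil]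
      by_cases hkvhpc : kv.1 = "HPC"
      · have : kv = kvH := pv_key_unique t.items hnd hkv hkvH (hkvhpc.trans hH.symm)
        subst this
        rw [if_pos hkvhpc, List.getD_eq_getElem kv.2 "" hlt]
      · rw [if_neg hkvhpc]
        rw [show (0:Int) + (n:Nat) = ((n:Nat):Int) from by ring, PySem.List.pyGetD_natCast]
    | some v =>
      by_cases hv : v = ""
      · subst hv
        simp only []
        refine pv_tab_congr _ _ _ (fun kv _ => ?_)
        rw [pv_col_append]
        simp [pvEntry, hmd, pvPlanOf, pvCol]
      · simp only [if_neg hv]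
        rw [show ("HPC" : String) = kvH.1 from hH.symm]
        rw [pv_modify_tab t.items _ hnd hkvH]
        rw [pv_keys_tab]
        rw [pv_fold_modify t.items _ hnd _ hks hnd (fun k => k ≠ kvH.1) _]
        refine pv_tab_congr _ _ _ (fun kv hkv => ?_)
        rw [pv_col_append]
        simp only [pvEntry, hmd, if_neg hv, pvPlanOf, pvCol, List.map, List.append_nil]
        by_cases hkvhpc : kv.1 = kvH.1
        · have : kv = kvH := pv_key_unique t.items hnd hkv hkvH hkvhpc
          subst this
          rw [if_neg (by simp), if_pos hkvhpc, if_pos (hkvhpc.trans hH)]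
        · rw [if_pos ⟨hmem kv hkv, hkvhpc⟩, if_neg hkvhpc, if_neg (fun h => hkvhpc (h.trans hH.symm))]
          rw [pv_getD_items t hnd hkv]
          rw [show (0:Int) + (n:Nat) = ((n:Nat):Int) from by ring, PySem.List.pyGetD_natCast]

lemma pv_new0 (t : PySem.Dict String (List String)) (hnd : t.keys.Nodup) :
    t.keys.foldl (fun d k => d.insert k ([] : List String)) PySem.Dict.empty
      = pvTab t.items (fun _ => []) := by
  have h := pv_fold_insert (fun k : String => k) (fun _ => ([] : List String)) t.keys
    PySem.Dict.empty (fun x _ => rfl) (by simpa using hnd)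
  simp only [PySem.Dict.empty] at h
  simp only [PySem.Dict.keys] at h ⊢
  simpa [pvTab, List.map_map, Function.comp] using h

lemma pv_B_fold (t : PySem.Dict String (List String)) (hnd : (t.items.map Prod.fst).Nodup)
    (plan : List (Int × String × Bool)) :
    t.items.foldl (fun (d : PySem.Dict String (List String)) kv =>
        if kv.1 = "HPC" then d.insert kv.1 (plan.map (fun e => e.2.1))
        else d.insert kv.1 (plan.foldl (fun out e => out ++ [PySem.List.pyGetD kv.2 e.1 ""]) []))
      PySem.Dict.empty = pvTab t.items (pvCol plan) := by
  have hb : (fun (d : PySem.Dict String (List String)) kv =>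
        if kv.1 = "HPC" then d.insert kv.1 (plan.map (fun e => e.2.1))
        else d.insert kv.1 (plan.foldl (fun out e => out ++ [PySem.List.pyGetD kv.2 e.1 ""]) []))
      = (fun d kv => d.insert kv.1 (pvCol plan kv)) := by
    funext d kv
    by_cases h : kv.1 = "HPC"
    · rw [if_pos h]
      congr 1
      rw [pvCol]
      exact (List.map_congr_left (fun e _ => by rw [if_pos h])).symm
    · rw [if_neg h]
      congr 1
      rw [PySem.List.foldl_append_singleton_eq_map, List.nil_append, pvCol]
      exact List.map_congr_left (fun e _ => by rw [if_neg h])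
  rw [hb]
  have h := pv_fold_insert Prod.fst (pvCol plan) t.items PySem.Dict.empty (fun x _ => rfl) hnd
  simp only [PySem.Dict.empty] at h
  simpa [pvTab] using h

lemma pv_A_eq (text : List (String × List String)) (map_dict : List (String × String))
    {pH : String × List String} (hpH : pH ∈ (PySem.Dict.ofList text).items)
    (hH : pH.1 = "HPC") :
    replace_bo text map_dict
      = (pvTab (PySem.Dict.ofList text).items
          (pvCol (pvPlanOf (PySem.Dict.ofList map_dict) pH.2 0))).items := by
  have hnd : ((PySem.Dict.ofList text).items.map Prod.fst).Nodup := by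
    have := PySem.Dict.nodup_keys_ofList text (ν := List String)
    simpa [PySem.Dict.keys] using this
  have hget : (PySem.Dict.ofList text).getD "HPC" [] = pH.2 := by
    rw [← hH]; exact pv_getD_items _ hnd hpH
  unfold replace_bo
  simp only [hget]
  rw [pv_new0 _ (by simpa [PySem.Dict.keys] using hnd)]
  rw [pv_A_inv (PySem.Dict.ofList map_dict) (PySem.Dict.ofList text) hnd hpH hH
    pH.2.length (le_refl _), List.take_length]

lemma pv_B_eq (text : List (String × List String)) (map_dict : List (String × String))
    {pH : String × List String} (hpH : pH ∈ (PySem.Dict.ofList text).items)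
    (hH : pH.1 = "HPC") :
    replace_bo_alt text map_dict
      = (pvTab (PySem.Dict.ofList text).items
          (pvCol (pvPlanOf (PySem.Dict.ofList map_dict) pH.2 0))).items := by
  have hnd : ((PySem.Dict.ofList text).items.map Prod.fst).Nodup := by
    have := PySem.Dict.nodup_keys_ofList text (ν := List String)
    simpa [PySem.Dict.keys] using this
  have hget : (PySem.Dict.ofList text).getD "HPC" [] = pH.2 := by
    rw [← hH]; exact pv_getD_items _ hnd hpH
  unfold replace_bo_alt
  simp only [hget]
  rw [pv_planB (PySem.Dict.ofList map_dict) pH.2 0 [], List.nil_append]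
  rw [pv_B_fold _ hnd]

-- ===== VERDICT (by name: the statement is the Claim_ definition above) =====
theorem replace_bo_spec : Claim_equal_replace_bo := by
  intro text map_dict _ hpre
  unfold Spec_replace_bo
  have hc : (PySem.Dict.ofList text).contains "HPC" = true := hpre.1
  obtain ⟨pH, hpH, hH⟩ : ∃ p ∈ (PySem.Dict.ofList text).items, p.1 = "HPC" := by
    simp only [PySem.Dict.contains, List.any_eq_true] at hc
    obtain ⟨p, h1, h2⟩ := hc
    exact ⟨p, h1, by simpa using h2⟩
  rw [pv_A_eq text map_dict hpH hH, pv_B_eq text map_dict hpH hH]
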